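-- pv_equiv track=rewrite | github.com/valjime95/Bayesian-InterProbit-Model | Python/Matrices_W.py | W_demo
-- ===== SOURCE A (Python) =====
-- def W_demo(W,lis,n):
-- 	i= 0
-- 	while i < n:
-- 		j = 0
-- 		while j < n:
-- 			if lis[i] == lis[j]:
-- 				W[i][j] = 1
-- 			else:
-- 				W[i][j] = 0
-- 			j+=1
-- 		i+=1
-- 	return W #W.values
-- ===== SOURCE B (Python) =====
-- def W_demo(W, lis, n):
--     # Same in-place mutation of W as the original; rows with equal labels are
--     # identical, so compute each distinct label's 0/1 row once and reuse it.
--     pattern = {}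
--     i = 0
--     while i < n:
--         v = lis[i]
--         row = pattern.get(v)
--         if row is None:
--             row = [1 if v == lis[j] else 0 for j in range(n)]
--             pattern[v] = row
--         Wi = W[i]
--         j = 0
--         while j < n:
--             Wi[j] = row[j]
--             j += 1
--         i += 1
--     return W
-- ===== Notes on version B (the rewrite author's own statement) =====
-- stated objective: faster
-- what changed: B memoizes the 0/1 indicator row per distinct label in a dict and copies the cached row into W, instead of recomputing the label comparison for every (i,j) pair.
import Mathlib
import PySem

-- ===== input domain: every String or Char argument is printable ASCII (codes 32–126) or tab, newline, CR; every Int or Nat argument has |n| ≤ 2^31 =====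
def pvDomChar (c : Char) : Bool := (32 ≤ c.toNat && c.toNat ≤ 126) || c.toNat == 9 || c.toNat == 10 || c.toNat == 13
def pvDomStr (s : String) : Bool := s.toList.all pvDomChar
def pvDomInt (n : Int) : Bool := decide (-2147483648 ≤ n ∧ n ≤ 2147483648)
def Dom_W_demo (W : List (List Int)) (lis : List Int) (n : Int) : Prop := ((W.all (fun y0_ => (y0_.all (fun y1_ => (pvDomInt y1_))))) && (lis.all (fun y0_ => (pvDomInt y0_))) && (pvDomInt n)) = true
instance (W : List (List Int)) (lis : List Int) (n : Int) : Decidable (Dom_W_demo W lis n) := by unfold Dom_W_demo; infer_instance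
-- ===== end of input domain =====

-- B memoizes the indicator row per distinct label in a dict instead of recomputing the
-- label comparison for every (i,j) pair; both Pythons mutate W in place identically, and
-- the theorems are about the returned value.

-- ===== PORT A =====
-- literal port of A's nested while loops: W[i][j] = 1/0 cell by cell
def W_demo (W : List (List Int)) (lis : List Int) (n : Int) : List (List Int) :=
  (PySem.List.pyRange 0 n 1).foldl (fun Wa i =>
    (PySem.List.pyRange 0 n 1).foldl (fun Wb j =>
      PySem.List.pySetD Wb i
        (PySem.List.pySetD (PySem.List.pyGetD Wb i [])
          j (if PySem.List.pyGetD lis i 0 = PySem.List.pyGetD lis j 0 then (1 : Int) else 0))) Wa) W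

-- ===== PORT B =====
-- B-side helper: the comprehension [1 if v == lis[j] else 0 for j in range(n)]
def rowFor (lis : List Int) (n v : Int) : List Int :=
  (PySem.List.pyRange 0 n 1).map
    (fun j => if v = PySem.List.pyGetD lis j 0 then (1 : Int) else 0)

-- literal port of Source B: state = (pattern dict, W); cached indicator row per distinct label
def W_demo_alt (W : List (List Int)) (lis : List Int) (n : Int) : List (List Int) :=
  ((PySem.List.pyRange 0 n 1).foldl
    (fun s i =>
      let v := PySem.List.pyGetD lis i 0
      let p : List Int × PySem.Dict Int (List Int) :=
        match s.1.get? v with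
        | some r => (r, s.1)
        | none => (rowFor lis n v, s.1.insert v (rowFor lis n v))
      let wi := PySem.List.pyGetD s.2 i []
      let wi' := (PySem.List.pyRange 0 n 1).foldl
        (fun r j => PySem.List.pySetD r j (PySem.List.pyGetD p.1 j 0)) wi
      (p.2, PySem.List.pySetD s.2 i wi'))
    ((PySem.Dict.empty : PySem.Dict Int (List Int)), W)).2

-- ===== PRECONDITION & SPEC =====
-- Pre_: exactly where Python A returns without IndexError: every index 0 ≤ i,j < n must
-- be in range of lis, of W, and of each of the first n rows of W.
def Pre_W_demo (W : List (List Int)) (lis : List Int) (n : Int) : Prop :=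
  n ≤ (lis.length : Int) ∧ n ≤ (W.length : Int) ∧ ∀ r ∈ W.take n.toNat, n ≤ (r.length : Int)
instance (W : List (List Int)) (lis : List Int) (n : Int) : Decidable (Pre_W_demo W lis n) := by
  unfold Pre_W_demo; infer_instance

def pvWitness_W_demo : List (List Int) × List Int × Int := ([[5, 5], [5, 5]], [3, 3], 2)

def Spec_W_demo (W : List (List Int)) (lis : List Int) (n : Int) (out : List (List Int)) : Prop := out = W_demo_alt W lis n
instance (W : List (List Int)) (lis : List Int) (n : Int) (out : List (List Int)) : Decidable (Spec_W_demo W lis n out) := by unfold Spec_W_demo; infer_instance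

-- ===== CLAIM (what is proved, stated in full; the proofs are below) =====
def Claim_equal_W_demo : Prop := ∀ (W : List (List Int)) (lis : List Int) (n : Int), Dom_W_demo W lis n → Pre_W_demo W lis n → Spec_W_demo W lis n (W_demo W lis n)

-- ===== LEMMAS AND PROOFS =====

-- pattern-dict invariant: every cached row is the indicator row of its key
def PatInv (lis : List Int) (n : Int) (d : PySem.Dict Int (List Int)) : Prop :=
  ∀ v r, d.get? v = some r → r = rowFor lis n v

-- A's inner while loop rewritten as "replace the whole row i"
theorem inner_set_row (l : List Int) (f : Int → Int) :
    ∀ (W : List (List Int)) (i : Int), 0 ≤ i → i.toNat < W.length →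
    l.foldl (fun Wb j =>
        PySem.List.pySetD Wb i (PySem.List.pySetD (PySem.List.pyGetD Wb i []) j (f j))) W
      = PySem.List.pySetD W i
          (l.foldl (fun r j => PySem.List.pySetD r j (f j)) (PySem.List.pyGetD W i [])) := by
  induction l with
  | nil =>
    intro W i hi hiW
    have hiW' : i < (W.length : Int) := by omega
    rw [List.foldl_nil, List.foldl_nil, PySem.List.pySetD_of_nonneg _ _ hi,
      PySem.List.pyGetD_eq_getElem _ _ hi hiW', List.set_getElem_self]
  | cons j l ih =>
    intro W i hi hiW
    have hiW' : i < (W.length : Int) := by omega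
    simp only [List.foldl_cons]
    rw [ih _ i hi (by rw [PySem.List.length_pySetD]; exact hiW)]
    rw [PySem.List.pySetD_of_nonneg _ _ hi, PySem.List.pySetD_of_nonneg _ _ hi,
      PySem.List.pySetD_of_nonneg _ _ hi]
    have hset : i < ((W.set i.toNat
        (PySem.List.pySetD (PySem.List.pyGetD W i []) j (f j))).length : Int) := by
      rw [List.length_set]; exact hiW'
    rw [PySem.List.pyGetD_eq_getElem _ _ hi hset,
      List.getElem_set_self (by rw [List.length_set]; exact hiW), List.set_set]

-- B's outer loop returns exactly A's outer loop, threading the pattern-dict invariant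
theorem outer_fold_eq (lis : List Int) (n : Int) :
    ∀ (l : List Int) (d : PySem.Dict Int (List Int)) (W : List (List Int)),
      (∀ i ∈ l, 0 ≤ i ∧ i.toNat < W.length) → PatInv lis n d →
      (l.foldl
        (fun s i =>
          let v := PySem.List.pyGetD lis i 0
          let p : List Int × PySem.Dict Int (List Int) :=
            match s.1.get? v with
            | some r => (r, s.1)
            | none => (rowFor lis n v, s.1.insert v (rowFor lis n v))
          let wi := PySem.List.pyGetD s.2 i []
          let wi' := (PySem.List.pyRange 0 n 1).foldl
            (fun r j => PySem.List.pySetD r j (PySem.List.pyGetD p.1 j 0)) wi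
          (p.2, PySem.List.pySetD s.2 i wi')) (d, W)).2
      = l.foldl (fun Wa i =>
          (PySem.List.pyRange 0 n 1).foldl (fun Wb j =>
            PySem.List.pySetD Wb i
              (PySem.List.pySetD (PySem.List.pyGetD Wb i [])
                j (if PySem.List.pyGetD lis i 0 = PySem.List.pyGetD lis j 0 then (1 : Int) else 0))) Wa) W := by
  intro l
  induction l with
  | nil => intro d W _ _; rfl
  | cons i l ih =>
    intro d W hidx hinv
    obtain ⟨hi0, hiW⟩ := hidx i (by simp)
    simp only [List.foldl_cons]
    -- B copies the row rowFor lis n (lis[i]) cell by cell; A writes the same values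
    have hcopy : ∀ r : List Int, r = rowFor lis n (PySem.List.pyGetD lis i 0) →
        PySem.List.pySetD W i
          ((PySem.List.pyRange 0 n 1).foldl
            (fun r' j => PySem.List.pySetD r' j (PySem.List.pyGetD r j 0))
            (PySem.List.pyGetD W i []))
        = (PySem.List.pyRange 0 n 1).foldl (fun Wb j =>
            PySem.List.pySetD Wb i
              (PySem.List.pySetD (PySem.List.pyGetD Wb i [])
                j (if PySem.List.pyGetD lis i 0 = PySem.List.pyGetD lis j 0 then (1 : Int) else 0))) W := by
      intro r hr
      rw [inner_set_row (PySem.List.pyRange 0 n 1)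
        (fun j => if PySem.List.pyGetD lis i 0 = PySem.List.pyGetD lis j 0 then (1 : Int) else 0)
        W i hi0 hiW]
      congr 1
      apply PySem.List.foldl_congr_mem
      intro acc j hj
      obtain ⟨hj0, hjn⟩ := (PySem.List.mem_pyRange_one).1 hj
      rw [hr, rowFor, PySem.List.pyGetD_map_pyRange_of_nonneg _ _ _ _ hj0 hjn]
    -- the new accumulator matrix has the same length, so the index bounds carry over
    have hidx' : ∀ W' : List (List Int), W'.length = W.length →
        ∀ i' ∈ l, 0 ≤ i' ∧ i'.toNat < W'.length := by
      intro W' hlen i' hi'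
      obtain ⟨h1, h2⟩ := hidx i' (by simp [hi'])
      exact ⟨h1, by rw [hlen]; exact h2⟩
    cases hd : d.get? (PySem.List.pyGetD lis i 0) with
    | some r =>
      simp only []
      rw [hcopy r (hinv _ _ hd)]
      exact ih d _ (hidx' _ (by rw [← hcopy r (hinv _ _ hd), PySem.List.length_pySetD])) hinv
    | none =>
      simp only []
      rw [hcopy _ rfl]
      refine ih _ _ (hidx' _ (by rw [← hcopy _ rfl, PySem.List.length_pySetD])) ?_
      intro v r hvr
      by_cases hv : v = PySem.List.pyGetD lis i 0
      · subst hv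
        rw [PySem.Dict.get?_insert_self] at hvr
        cases hvr; rfl
      · rw [PySem.Dict.get?_insert_of_ne _ _ hv] at hvr
        exact hinv _ _ hvr

-- ===== VERDICT (by name: the statement is the Claim_ definition above) =====
theorem W_demo_spec : Claim_equal_W_demo := by
  intro W lis n _ hpre
  obtain ⟨hl, hW, _⟩ := hpre
  unfold Spec_W_demo W_demo W_demo_alt
  symm
  apply outer_fold_eq
  · intro i hi
    obtain ⟨h0, h1⟩ := (PySem.List.mem_pyRange_one).1 hi
    exact ⟨h0, by omega⟩
  · intro v r h
    rw [PySem.Dict.get?_empty] at h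
    exact absurd h (by simp)
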